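-- pv_equiv track=rewrite | github.com/wsinbol/nlp_test | bayes-text-classifier/bayes-text-classifier.py | text_features
-- ===== SOURCE A (Python) =====
-- def text_features(train_data_list, test_data_list, features_words):
-- 	def text_features(text, features_words):
-- 		text_words = set(text)
-- 		features = [1 if word in text_words else 0 for word in features_words]
-- 		return features
-- 	train_feature_list = [text_features(text, features_words) for text in train_data_list]
-- 	test_feature_list = [text_features(text, features_words) for text in test_data_list]
-- 	return train_feature_list, test_feature_list
-- ===== SOURCE B (Python) =====
-- def text_features(train_data_list, test_data_list, features_words):
--     index = {}
--     for i, w in enumerate(features_words):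
--         index.setdefault(w, []).append(i)
--     n = len(features_words)
--     def vec(text):
--         v = [0] * n
--         for w in set(text):
--             for i in index.get(w, []):
--                 v[i] = 1
--         return v
--     return [vec(t) for t in train_data_list], [vec(t) for t in test_data_list]
-- ===== Notes on version B (the rewrite author's own statement) =====
-- stated objective: alternative
-- what changed: Builds a word-to-indices dict over features_words once, then for each text scatters 1s at the looked-up positions of its distinct words into a zeros vector, instead of testing membership of every feature word in every text's set.
import Mathlib
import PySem

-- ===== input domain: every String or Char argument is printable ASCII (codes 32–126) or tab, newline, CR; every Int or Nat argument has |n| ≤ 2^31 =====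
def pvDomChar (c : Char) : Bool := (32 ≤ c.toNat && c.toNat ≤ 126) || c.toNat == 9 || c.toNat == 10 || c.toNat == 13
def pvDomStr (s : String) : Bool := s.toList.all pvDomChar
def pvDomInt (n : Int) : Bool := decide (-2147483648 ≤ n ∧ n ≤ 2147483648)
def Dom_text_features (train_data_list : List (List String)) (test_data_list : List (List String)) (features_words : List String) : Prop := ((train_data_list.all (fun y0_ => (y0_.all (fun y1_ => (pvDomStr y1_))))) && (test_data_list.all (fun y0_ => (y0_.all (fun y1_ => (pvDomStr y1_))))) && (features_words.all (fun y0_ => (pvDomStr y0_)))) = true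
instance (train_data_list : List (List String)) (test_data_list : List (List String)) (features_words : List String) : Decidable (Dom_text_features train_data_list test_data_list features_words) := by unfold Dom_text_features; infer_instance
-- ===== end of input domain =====

-- B builds a word→indices dict over features_words once and scatters 1s into a zeros
-- vector at the looked-up positions of each text's distinct words, instead of testing
-- set membership of every feature word per text (objective: alternative decomposition).

-- ===== PORT A =====
-- inner helper 'text_features(text, features_words)' of A
def pvVecA (text : List String) (features_words : List String) : List Int :=
  let text_words := PySem.Set.ofList text
  features_words.map (fun word => if PySem.Set.contains text_words word then 1 else 0)

def text_features (train_data_list : List (List String)) (test_data_list : List (List String)) (features_words : List String) : List (List Int) × List (List Int) :=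
  let train_feature_list := train_data_list.map (fun text => pvVecA text features_words)
  let test_feature_list := test_data_list.map (fun text => pvVecA text features_words)
  (train_feature_list, test_feature_list)

-- ===== PORT B =====
-- the (word, position) pairs produced by 'enumerate(features_words)' (counter made explicit)
def pvIdxPairs : List String → Nat → List (String × Nat)
  | [], _ => []
  | w :: ws, i => (w, i) :: pvIdxPairs ws (i + 1)

-- index = {}; for i, w in enumerate(features_words): index.setdefault(w, []).append(i)
def pvBuildIndex (features_words : List String) : PySem.Dict String (List Nat) :=
  (pvIdxPairs features_words 0).foldl (fun d p => d.modify p.1 [] (· ++ [p.2])) PySem.Dict.empty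

-- v = [0]*n; for w in set(text): for i in index.get(w, []): v[i] = 1
-- (indices come from enumerate, so each is a Nat in range: List.set is exact here;
--  the result does not depend on the set's iteration order — proved via pvVecB_eq_pvVecA)
def pvVecB (n : Nat) (index : PySem.Dict String (List Nat)) (text : List String) : List Int :=
  (PySem.Set.ofList text).foldl
    (fun v w => (index.getD w []).foldl (fun v i => v.set i 1) v)
    (List.replicate n 0)

def text_features_alt (train_data_list : List (List String)) (test_data_list : List (List String)) (features_words : List String) : List (List Int) × List (List Int) :=
  let index := pvBuildIndex features_words
  let n := features_words.length
  (train_data_list.map (fun t => pvVecB n index t),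
   test_data_list.map (fun t => pvVecB n index t))

-- ===== PRECONDITION & SPEC =====
def Spec_text_features (train_data_list : List (List String)) (test_data_list : List (List String)) (features_words : List String) (out : List (List Int) × List (List Int)) : Prop := out = text_features_alt train_data_list test_data_list features_words
instance (train_data_list : List (List String)) (test_data_list : List (List String)) (features_words : List String) (out : List (List Int) × List (List Int)) : Decidable (Spec_text_features train_data_list test_data_list features_words out) := by unfold Spec_text_features; infer_instance

-- ===== CLAIM (what is proved, stated in full; the proofs are below) =====
def Claim_equal_text_features : Prop := ∀ (train_data_list : List (List String)) (test_data_list : List (List String)) (features_words : List String), Dom_text_features train_data_list test_data_list features_words → Spec_text_features train_data_list test_data_list features_words (text_features train_data_list test_data_list features_words)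

-- ===== LEMMAS AND PROOFS =====

lemma getElem?_set_int (l : List Int) (i j : Nat) (a : Int) :
    (l.set i a)[j]? = if i = j ∧ i < l.length then some a else l[j]? := by
  rw [List.getElem?_set]
  split_ifs
  all_goals simp_all
  all_goals omega

lemma mem_pvIdxPairs (fw : List String) (s : Nat) (p : String × Nat) :
    p ∈ pvIdxPairs fw s ↔ ∃ k, ∃ _ : k < fw.length, p = (fw[k], s + k) := by
  induction fw generalizing s with
  | nil => simp [pvIdxPairs]
  | cons w ws ih =>
    simp only [pvIdxPairs, List.mem_cons, ih]
    constructor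
    · rintro (rfl | ⟨k, hk, rfl⟩)
      · exact ⟨0, by simp, by simp⟩
      · exact ⟨k + 1, by simpa using hk, by simp; omega⟩
    · rintro ⟨k, hk, rfl⟩
      cases k with
      | zero => left; simp
      | succ k => right; exact ⟨k, by simpa using hk, by simp; omega⟩

lemma getD_pvBuildIndex (fw : List String) (w : String) :
    (pvBuildIndex fw).getD w [] = ((pvIdxPairs fw 0).filter (fun p => p.1 == w)).map (·.2) := by
  rw [pvBuildIndex, PySem.Dict.getD_foldl_modify_append, PySem.Dict.getD_empty]
  simp

lemma mem_getD_pvBuildIndex (fw : List String) (w : String) (j : Nat) :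
    j ∈ (pvBuildIndex fw).getD w [] ↔ ∃ _ : j < fw.length, fw[j] = w := by
  rw [getD_pvBuildIndex]
  simp only [List.mem_map, List.mem_filter, mem_pvIdxPairs]
  constructor
  · rintro ⟨p, ⟨⟨k, hk, rfl⟩, hw⟩, rfl⟩
    simp at hw ⊢
    exact ⟨hk, by simpa using hw⟩
  · rintro ⟨hj, rfl⟩
    exact ⟨(fw[j], j), ⟨⟨j, hj, by simp⟩, by simp⟩, rfl⟩

lemma scatter_length (L : List Nat) (v : List Int) :
    (L.foldl (fun v i => v.set i 1) v).length = v.length := by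
  induction L generalizing v with
  | nil => rfl
  | cons i L ih => simp [List.foldl_cons, ih]

lemma scatter_getElem? (L : List Nat) (v : List Int) (j : Nat) :
    (L.foldl (fun v i => v.set i 1) v)[j]? =
      if j ∈ L ∧ j < v.length then some 1 else v[j]? := by
  induction L generalizing v with
  | nil => simp
  | cons i L ih =>
    simp only [List.foldl_cons, ih, List.length_set, getElem?_set_int, List.mem_cons]
    by_cases hj : j < v.length
    · by_cases hij : i = j
      · subst hij; simp [hj]
      · by_cases hm : j ∈ L <;> simp [hm, hj, hij, Ne.symm hij]
    · simp [hj]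
      intro h; omega

lemma words_scatter_getElem? (ws : List String) (idx : PySem.Dict String (List Nat)) (v : List Int) (j : Nat) :
    (ws.foldl (fun v w => (idx.getD w []).foldl (fun v i => v.set i 1) v) v)[j]? =
      if (∃ w ∈ ws, j ∈ idx.getD w []) ∧ j < v.length then some 1 else v[j]? := by
  induction ws generalizing v with
  | nil => simp
  | cons w ws ih =>
    simp only [List.foldl_cons, ih, scatter_length, scatter_getElem?, List.mem_cons]
    by_cases hj : j < v.length
    · by_cases h1 : j ∈ idx.getD w []
      · simp [h1, hj]
      · by_cases h2 : ∃ u ∈ ws, j ∈ idx.getD u []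
        · simp [h1, h2, hj]
        · have : ¬ ∃ u, (u = w ∨ u ∈ ws) ∧ j ∈ idx.getD u [] := by
            rintro ⟨u, (rfl | hu), hm⟩
            · exact h1 hm
            · exact h2 ⟨u, hu, hm⟩
          simp [h1, h2, hj, this]
    · simp [hj]

lemma pvVecB_eq_pvVecA (fw : List String) (t : List String) :
    pvVecB fw.length (pvBuildIndex fw) t = pvVecA t fw := by
  apply List.ext_getElem?
  intro j
  rw [pvVecB, pvVecA, words_scatter_getElem?]
  simp only [List.length_replicate, List.getElem?_map]
  by_cases hj : j < fw.length
  · rw [List.getElem?_eq_getElem hj, List.getElem?_eq_getElem (by simpa using hj : j < (List.replicate fw.length (0:Int)).length)]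
    simp only [List.getElem_replicate, Option.map_some]
    by_cases ht : fw[j] ∈ t
    · have h1 : ∃ w ∈ t, j ∈ (pvBuildIndex fw).getD w [] :=
        ⟨fw[j], ht, (mem_getD_pvBuildIndex fw _ j).2 ⟨hj, rfl⟩⟩
      simp [ht, hj, PySem.Set.contains, h1]
    · have h2 : ∀ x ∈ t, j ∉ (pvBuildIndex fw).getD x [] := by
        intro x hx hm
        rw [mem_getD_pvBuildIndex] at hm
        obtain ⟨_, rfl⟩ := hm
        exact ht hx
      simp [ht, hj, PySem.Set.contains]
      exact h2
  · rw [List.getElem?_eq_none (by simpa using hj), List.getElem?_eq_none (by simpa using hj)]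
    simp [hj]

-- ===== VERDICT (by name: the statement is the Claim_ definition above) =====
theorem text_features_spec : Claim_equal_text_features := by
  intro tr te fw _
  show _ = _
  simp only [text_features, text_features_alt]
  congr 1 <;>
    · apply List.map_congr_left
      intro t _
      exact (pvVecB_eq_pvVecA fw t).symm
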